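-- pv_equiv track=rewrite | github.com/LuisPerez64/Prac | python/coding_challenges/leet_code/k_empty_slots.py | pulled_implementation
-- ===== SOURCE A (Python) =====
-- from typing import List
--
-- def pulled_implementation(flowers: List[int], k: int) -> int:
--     """
--     As in Approach #2, we have days[x] = i for the time that the flower at position x blooms.
--      We wanted to find candidate intervals [left, right] where days[left], days[right] are the two smallest
--      values in [days[left], days[left+1], ..., days[right]], and right - left = k + 1.
--
--     Notice that these candidate intervals cannot intersect: for example, if the candidate intervals
--         are [left1, right1] and [left2, right2] with left1 < left2 < right1 < right2, then for the first interval to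
--          be a candidate, days[left2] > days[right1]; and for the second interval to be a candidate,
--          days[right1] > days[left2], a contradiction.
--
--     That means whenever whether some interval can be a candidate and it fails first at i, indices j < i can't be
--     the start of a candidate interval. This motivates a sliding window approach.
--
--     Algorithm
--     As in Approach #2, we construct days.
--     Then, for each interval [left, right] (starting with the first available one),
--     we'll check whether it is a candidate: whether days[i] > days[left]
--         and days[i] > days[right] for left < i < right.
--     If we fail, then we've found some new minimum days[i] and we should check the new interval [i, i+k+1].
--     If we succeed, then it's a candidate answer, and we'll check the new interval [right, right+k+1].
--     """
--     days = [0] * len(flowers)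
--     for day, position in enumerate(flowers, 1):
--         days[position - 1] = day
--
--     ans = float('inf')
--     left, right = 0, k + 1
--     while right < len(days):
--         for i in range(left + 1, right):
--             if days[i] < days[left] or days[i] < days[right]:
--                 left, right = i, i + k + 1
--                 break
--         else:
--             ans = min(ans, max(days[left], days[right]))
--             left, right = right, right + k + 1
--
--     return ans if ans < float('inf') else -1
-- ===== SOURCE B (Python) =====
-- from typing import List
--
--
-- def pulled_implementation(flowers: List[int], k: int) -> int:
--     # Direct window enumeration: a window [left, left+k+1] is a candidate iff
--     # no slot strictly between blooms earlier than either endpoint; its cost is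
--     # the later of the two endpoint bloom days.  Answer = smallest cost, -1 if none.
--     n = len(flowers)
--     days = [0] * n
--     for day, position in enumerate(flowers, 1):
--         days[position - 1] = day
--     best = -1
--     for left in range(n - (k + 1)):
--         right = left + k + 1
--         if all(days[i] >= days[left] and days[i] >= days[right] for i in range(left + 1, right)):
--             value = max(days[left], days[right])
--             if best == -1 or value < best:
--                 best = value
--     return best
-- ===== Notes on version B (the rewrite author's own statement) =====
-- stated objective: simpler
-- what changed: Replaces A's jump-ahead sliding window (two moving pointers with an inner for/else scan and interval-skipping) by a direct enumeration of every window [l, l+k+1] over the days array, keeping the minimum candidate cost with a -1 sentinel.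
import Mathlib
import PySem

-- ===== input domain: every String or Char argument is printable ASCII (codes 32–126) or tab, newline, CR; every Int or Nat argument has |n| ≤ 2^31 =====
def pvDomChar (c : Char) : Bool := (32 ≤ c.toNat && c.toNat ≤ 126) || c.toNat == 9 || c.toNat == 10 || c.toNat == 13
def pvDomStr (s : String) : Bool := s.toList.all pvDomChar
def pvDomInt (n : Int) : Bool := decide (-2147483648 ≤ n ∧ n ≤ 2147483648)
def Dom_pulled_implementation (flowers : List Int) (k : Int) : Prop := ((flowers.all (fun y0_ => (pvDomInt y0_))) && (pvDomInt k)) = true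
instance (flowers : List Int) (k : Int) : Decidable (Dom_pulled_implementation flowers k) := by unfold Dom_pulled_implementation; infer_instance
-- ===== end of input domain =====

-- B replaces A's jump-ahead sliding window by a direct enumeration of every candidate window
-- [l, l+k+1] over the days array (objective: simpler; B is O(n*k) vs A's O(n)).


-- ===== PORT A =====
-- both Pythons build days[] by the same loop: 'for day, position in enumerate(flowers, 1): days[position-1] = day'
def pvDaysLoop (days : List Int) (day : Int) : List Int → List Int
  | [] => days
  | p :: ps => pvDaysLoop (PySem.List.pySetD days (p - 1) day) (day + 1) ps

def pvBuildDays (flowers : List Int) : List Int :=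
  pvDaysLoop (List.replicate flowers.length 0) 1 flowers

-- ans = float('inf') modelled as Option Int (none = inf); pvMin2 is min on that
def pvMin2 : Option Int → Option Int → Option Int
  | none, b => b
  | some a, none => some a
  | some a, some b => some (min a b)

-- A's inner 'for i in range(left+1, right): if …: break / else:' = first failing index, if any
def pvScan (days : List Int) (left right : Int) : Option Int :=
  (PySem.List.pyRange (left + 1) right 1).find? (fun i =>
    decide (PySem.List.pyGetD days i 0 < PySem.List.pyGetD days left 0) ||
    decide (PySem.List.pyGetD days i 0 < PySem.List.pyGetD days right 0))

-- A's while loop; fuel only makes the recursion total (left strictly increases each iteration)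
def pvALoop (days : List Int) (k : Int) : Nat → Int → Int → Option Int → Option Int
  | 0, _, _, ans => ans
  | fuel + 1, left, right, ans =>
    if right < (days.length : Int) then
      match pvScan days left right with
      | some i => pvALoop days k fuel i (i + k + 1) ans
      | none => pvALoop days k fuel right (right + k + 1)
          (pvMin2 ans (some (max (PySem.List.pyGetD days left 0) (PySem.List.pyGetD days right 0))))
    else ans

def pulled_implementation (flowers : List Int) (k : Int) : Int :=
  match pvALoop (pvBuildDays flowers) k ((pvBuildDays flowers).length + 1) 0 (k + 1) none with
  | some v => v
  | none => -1

-- ===== PORT B =====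
-- B's 'all(days[i] >= days[left] and days[i] >= days[right] for i in range(left+1, right))'
def pvOk (days : List Int) (k left : Int) : Bool :=
  (PySem.List.pyRange (left + 1) (left + k + 1) 1).all (fun i =>
    decide (PySem.List.pyGetD days left 0 ≤ PySem.List.pyGetD days i 0) &&
    decide (PySem.List.pyGetD days (left + k + 1) 0 ≤ PySem.List.pyGetD days i 0))

-- B's 'value = max(days[left], days[right])' with right = left + k + 1
def pvVal (days : List Int) (k left : Int) : Int :=
  max (PySem.List.pyGetD days left 0) (PySem.List.pyGetD days (left + k + 1) 0)

def pulled_implementation_alt (flowers : List Int) (k : Int) : Int :=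
  (PySem.List.pyRange 0 (((pvBuildDays flowers).length : Int) - (k + 1)) 1).foldl
    (fun best left =>
      if pvOk (pvBuildDays flowers) k left then
        if best == -1 || pvVal (pvBuildDays flowers) k left < best then
          pvVal (pvBuildDays flowers) k left
        else best
      else best)
    (-1)

-- ===== PRECONDITION & SPEC =====
-- Pre_ admits every input on which A returns: outside it A raises IndexError (a position outside
-- [1-n, n], or the empty list with k ≤ -2) or loops forever (k < 0 on a nonempty list).
def Pre_pulled_implementation (flowers : List Int) (k : Int) : Prop :=
  (∀ p ∈ flowers, 1 - (flowers.length : Int) ≤ p ∧ p ≤ (flowers.length : Int)) ∧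
    (0 ≤ k ∨ (flowers = [] ∧ k = -1))
instance (flowers : List Int) (k : Int) : Decidable (Pre_pulled_implementation flowers k) := by
  unfold Pre_pulled_implementation; infer_instance

def pvWitness_pulled_implementation : List Int × Int := ([1, 3, 2], 1)

def Spec_pulled_implementation (flowers : List Int) (k : Int) (out : Int) : Prop := out = pulled_implementation_alt flowers k
instance (flowers : List Int) (k : Int) (out : Int) : Decidable (Spec_pulled_implementation flowers k out) := by unfold Spec_pulled_implementation; infer_instance

-- ===== CLAIM (what is proved, stated in full; the proofs are below) =====
def Claim_equal_pulled_implementation : Prop := ∀ (flowers : List Int) (k : Int), Dom_pulled_implementation flowers k → Pre_pulled_implementation flowers k → Spec_pulled_implementation flowers k (pulled_implementation flowers k)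

-- ===== LEMMAS AND PROOFS =====

-- minimum over the candidate windows l ∈ [lo, lo+c), as an Option (none = no candidate)
def pvCand (days : List Int) (k : Int) (lo : Int) : Nat → Option Int
  | 0 => none
  | c + 1 => pvMin2 (if pvOk days k lo then some (pvVal days k lo) else none)
      (pvCand days k (lo + 1) c)

def pvEnc : Option Int → Int
  | some v => v
  | none => -1

theorem pvMin2_none_right (o : Option Int) : pvMin2 o none = o := by cases o <;> rfl

theorem pvMin2_assoc (a b c : Option Int) : pvMin2 (pvMin2 a b) c = pvMin2 a (pvMin2 b c) := by
  cases a <;> cases b <;> cases c <;> simp [pvMin2, min_assoc]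

theorem pvRange_norm (a b : Int) :
    PySem.List.pyRange a b 1 = PySem.List.pyRange a (a + ((b - a).toNat : Int)) 1 := by
  have h : ((a + ((b - a).toNat : Int)) - a).toNat = (b - a).toNat := by omega
  rw [PySem.List.pyRange_one, PySem.List.pyRange_one, h]

theorem pvOk_iff (days : List Int) (k l : Int) :
    pvOk days k l = true ↔ ∀ i, l < i → i < l + k + 1 →
      PySem.List.pyGetD days l 0 ≤ PySem.List.pyGetD days i 0 ∧
      PySem.List.pyGetD days (l + k + 1) 0 ≤ PySem.List.pyGetD days i 0 := by
  simp [pvOk, List.all_eq_true, PySem.List.mem_pyRange_one]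

theorem pvFind?_some (p : Int → Bool) :
    ∀ (c : Nat) (a b : Int), b - a ≤ (c : Int) →
      ∀ i, (PySem.List.pyRange a b 1).find? p = some i →
        a ≤ i ∧ i < b ∧ p i = true ∧ ∀ j, a ≤ j → j < i → p j = false := by
  intro c
  induction c with
  | zero =>
    intro a b hc i h
    rw [PySem.List.pyRange_one_eq_nil (by omega)] at h
    simp at h
  | succ c ih =>
    intro a b hc i h
    by_cases hab : a < b
    · rw [PySem.List.pyRange_one_cons hab] at h
      by_cases hpa : p a = true
      · rw [List.find?_cons_of_pos hpa] at h
        obtain rfl : a = i := by simpa using h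
        exact ⟨le_refl a, hab, hpa, fun j h1 h2 => absurd (lt_of_le_of_lt h1 h2) (lt_irrefl a)⟩
      · rw [List.find?_cons_of_neg hpa] at h
        obtain ⟨h1, h2, h3, h4⟩ := ih (a + 1) b (by omega) i h
        refine ⟨by omega, h2, h3, fun j hj1 hj2 => ?_⟩
        rcases eq_or_lt_of_le hj1 with rfl | hj
        · simpa using hpa
        · exact h4 j (by omega) hj2
    · rw [PySem.List.pyRange_one_eq_nil (by omega)] at h
      simp at h

theorem pvFind?_none (p : Int → Bool) (a b : Int)
    (h : (PySem.List.pyRange a b 1).find? p = none) :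
    ∀ j, a ≤ j → j < b → p j = false := by
  intro j h1 h2
  have := List.find?_eq_none.mp h j (by rw [PySem.List.mem_pyRange_one]; exact ⟨h1, h2⟩)
  simpa using this

theorem pvCand_skip (days : List Int) (k : Int) :
    ∀ (c : Nat) (lo m : Int), lo ≤ m →
      (∀ j, lo ≤ j → j < m → pvOk days k j = false) →
      pvCand days k lo c = pvCand days k m (c - (m - lo).toNat) := by
  intro c
  induction c with
  | zero => intro lo m _ _; rw [Nat.zero_sub]; rfl
  | succ c ih =>
    intro lo m hle hbad
    rcases eq_or_lt_of_le hle with rfl | hlt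
    · simp
    · have hok : pvOk days k lo = false := hbad lo (le_refl lo) hlt
      have : pvCand days k lo (c + 1) = pvCand days k (lo + 1) c := by
        simp [pvCand, hok, pvMin2]
      rw [this, ih (lo + 1) m (by omega) (fun j h1 h2 => hbad j (by omega) h2)]
      congr 1
      omega

theorem pvCand_drop (days : List Int) (k : Int) :
    ∀ (c : Nat) (lo m v : Int), lo ≤ m →
      (∀ j, lo ≤ j → j < m → v ≤ pvVal days k j) →
      pvMin2 (some v) (pvCand days k lo c)
        = pvMin2 (some v) (pvCand days k m (c - (m - lo).toNat)) := by
  intro c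
  induction c with
  | zero => intro lo m v _ _; rw [Nat.zero_sub]; rfl
  | succ c ih =>
    intro lo m v hle hdom
    rcases eq_or_lt_of_le hle with rfl | hlt
    · simp
    · have step : pvMin2 (some v) (pvCand days k lo (c + 1))
          = pvMin2 (some v) (pvCand days k (lo + 1) c) := by
        rw [pvCand, ← pvMin2_assoc]
        congr 1
        by_cases hok : pvOk days k lo = true
        · rw [if_pos hok]
          simp only [pvMin2]
          exact congrArg some (min_eq_left (hdom lo (le_refl lo) hlt))
        · rw [if_neg hok, pvMin2_none_right]
      rw [step, ih (lo + 1) m v (by omega) (fun j a b => hdom j (by omega) b)]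
      have hc : c - (m - (lo + 1)).toNat = (c + 1) - (m - lo).toNat := by omega
      rw [hc]

-- ===== the days[] entries are nonnegative =====

theorem pvMem_pySetD {xs : List Int} {i v x : Int}
    (h : x ∈ PySem.List.pySetD xs i v) : x ∈ xs ∨ x = v := by
  unfold PySem.List.pySetD PySem.List.pySet? at h
  cases hg : PySem.List.pyIdx? xs.length i with
  | none => rw [hg] at h; simp at h; exact Or.inl h
  | some m => rw [hg] at h; simp at h; exact List.mem_or_eq_of_mem_set h

theorem pvDaysLoop_nonneg : ∀ (ps : List Int) (days : List Int) (day : Int),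
    (∀ x ∈ days, 0 ≤ x) → 0 ≤ day → ∀ x ∈ pvDaysLoop days day ps, 0 ≤ x := by
  intro ps
  induction ps with
  | nil => intro days day hd _ x hx; exact hd x hx
  | cons p ps ih =>
    intro days day hd hday x hx
    refine ih _ (day + 1) ?_ (by omega) x hx
    intro y hy
    rcases pvMem_pySetD hy with hmem | rfl
    · exact hd y hmem
    · exact hday

theorem pvDays_nonneg (flowers : List Int) (i : Int) :
    0 ≤ PySem.List.pyGetD (pvBuildDays flowers) i 0 := by
  have hmem : ∀ x ∈ pvBuildDays flowers, 0 ≤ x := by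
    intro x hx
    refine pvDaysLoop_nonneg flowers _ 1 ?_ (by omega) x hx
    intro y hy
    have := List.eq_of_mem_replicate hy
    omega
  unfold PySem.List.pyGetD
  cases hg : PySem.List.pyGet? (pvBuildDays flowers) i with
  | none => simp
  | some a => simpa using hmem a (PySem.List.mem_of_pyGet?_eq_some _ hg)

-- ===== A's sliding window computes the candidate minimum =====

theorem pvALoop_eq (days : List Int) (k : Int) (hk : 0 ≤ k) :
    ∀ (fuel : Nat) (left : Int) (o : Option Int), 0 ≤ left →
      ((days.length : Int) - left).toNat ≤ fuel →
      pvALoop days k fuel left (left + k + 1) o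
        = pvMin2 o (pvCand days k left (((days.length : Int) - (k + 1) - left).toNat)) := by
  intro fuel
  induction fuel with
  | zero =>
    intro left o hl hf
    have : ((days.length : Int) - (k + 1) - left).toNat = 0 := by omega
    rw [this, pvALoop]
    exact (pvMin2_none_right o).symm
  | succ fuel ih =>
    intro left o hl hf
    rw [pvALoop]
    by_cases hlt : left + k + 1 < (days.length : Int)
    · rw [if_pos hlt]
      cases hscan : pvScan days left (left + k + 1) with
      | some i =>
        show pvALoop days k fuel i (i + k + 1) o
            = pvMin2 o (pvCand days k left (((days.length : Int) - (k + 1) - left).toNat))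
        obtain ⟨h1, h2, h3, h4⟩ := pvFind?_some _ ((left + k + 1 - (left + 1)).toNat)
          (left + 1) (left + k + 1) (by omega) i (by rw [← pvScan]; exact hscan)
        have hPi : PySem.List.pyGetD days i 0 < PySem.List.pyGetD days left 0 ∨
            PySem.List.pyGetD days i 0 < PySem.List.pyGetD days (left + k + 1) 0 := by
          simpa using h3
        have hskip : ∀ j, left ≤ j → j < i → pvOk days k j = false := by
          intro j hj1 hj2
          rcases eq_or_lt_of_le hj1 with heq | hjl
          · subst heq
            by_contra hok
            have := (pvOk_iff days k left).mp (by simpa using hok) i (by omega) (by omega)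
            omega
          · have hnP := h4 j (by omega) hj2
            have hge : PySem.List.pyGetD days left 0 ≤ PySem.List.pyGetD days j 0 ∧
                PySem.List.pyGetD days (left + k + 1) 0 ≤ PySem.List.pyGetD days j 0 := by
              simp at hnP
              omega
            by_contra hok
            have := (pvOk_iff days k j).mp (by simpa using hok) i (by omega) (by omega)
            omega
        rw [ih i o (by omega) (by omega)]
        congr 1
        rw [pvCand_skip days k _ left i (by omega) hskip]
        congr 1
        omega
      | none =>
        show pvALoop days k fuel (left + k + 1) (left + k + 1 + k + 1)
              (pvMin2 o (some (max (PySem.List.pyGetD days left 0)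
                (PySem.List.pyGetD days (left + k + 1) 0))))
            = pvMin2 o (pvCand days k left (((days.length : Int) - (k + 1) - left).toNat))
        have hall : ∀ m, left + 1 ≤ m → m < left + k + 1 →
            PySem.List.pyGetD days left 0 ≤ PySem.List.pyGetD days m 0 ∧
            PySem.List.pyGetD days (left + k + 1) 0 ≤ PySem.List.pyGetD days m 0 := by
          intro m hm1 hm2
          have := pvFind?_none _ (left + 1) (left + k + 1) (by rw [← pvScan]; exact hscan)
            m hm1 hm2
          simp at this
          omega
        have hokl : pvOk days k left = true := by
          rw [pvOk_iff]
          intro m hm1 hm2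
          exact hall m (by omega) hm2
        have hdrop : ∀ j, left + 1 ≤ j → j < left + k + 1 →
            pvVal days k left ≤ pvVal days k j := by
          intro j hj1 hj2
          have h := hall j hj1 hj2
          exact le_trans (max_le h.1 h.2) (le_max_left _ _)
        have hcnt : (((days.length : Int) - (k + 1) - left).toNat)
            = (((days.length : Int) - (k + 1) - left - 1).toNat) + 1 := by omega
        have hfb : ((days.length : Int) - (left + k + 1)).toNat ≤ fuel := by omega
        rw [ih (left + k + 1) (pvMin2 o (some (max (PySem.List.pyGetD days left 0)
          (PySem.List.pyGetD days (left + k + 1) 0)))) (by omega) hfb]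
        rw [hcnt, pvCand]
        rw [if_pos hokl]
        rw [pvCand_drop days k _ (left + 1) (left + k + 1) (pvVal days k left)
          (by omega) hdrop]
        rw [pvMin2_assoc]
        have hcc : (((days.length : Int) - (k + 1) - (left + k + 1)).toNat)
            = ((((days.length : Int) - (k + 1) - left - 1).toNat)
                - ((left + k + 1) - (left + 1)).toNat) := by omega
        rw [hcc]
        rfl
    · rw [if_neg hlt]
      have : ((days.length : Int) - (k + 1) - left).toNat = 0 := by omega
      rw [this]
      exact (pvMin2_none_right o).symm
-- ===== B's fold computes the candidate minimum =====

theorem pvFoldB (days : List Int) (k : Int) :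
    ∀ (c : Nat) (lo : Int) (o : Option Int),
      (∀ x, o = some x → 0 ≤ x) →
      (∀ l, lo ≤ l → l < lo + (c : Int) → 0 ≤ pvVal days k l) →
      (PySem.List.pyRange lo (lo + (c : Int)) 1).foldl
        (fun best left =>
          if pvOk days k left then
            if best == -1 || pvVal days k left < best then pvVal days k left else best
          else best)
        (pvEnc o)
      = pvEnc (pvMin2 o (pvCand days k lo c)) := by
  intro c
  induction c with
  | zero =>
    intro lo o ho hv
    rw [PySem.List.pyRange_one_eq_nil (by omega)]
    rw [List.foldl_nil, pvCand, pvMin2_none_right]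
  | succ c ih =>
    intro lo o ho hv
    rw [PySem.List.pyRange_one_cons (by omega), List.foldl_cons]
    have hstep : (if pvOk days k lo then
          if pvEnc o == -1 || pvVal days k lo < pvEnc o then pvVal days k lo else pvEnc o
        else pvEnc o)
        = pvEnc (pvMin2 o (if pvOk days k lo then some (pvVal days k lo) else none)) := by
      by_cases hok : pvOk days k lo = true
      · rw [if_pos hok, if_pos hok]
        cases o with
        | none => simp [pvEnc, pvMin2]
        | some a =>
          have ha : 0 ≤ a := ho a rfl
          have : ((a == -1) = false) := by simp; omega
          simp only [pvEnc, pvMin2, this, Bool.false_or]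
          by_cases hva : pvVal days k lo < a
          · simp [hva, le_of_lt hva]
          · simp at hva
            simp [hva, not_lt.mpr hva]
      · rw [if_neg hok, if_neg hok, pvMin2_none_right]
    rw [hstep]
    have harg : lo + ((c : Int) + 1) = (lo + 1) + (c : Int) := by ring
    rw [show lo + (((c + 1 : Nat)) : Int) = (lo + 1) + (c : Int) by push_cast; ring]
    rw [ih (lo + 1) (pvMin2 o (if pvOk days k lo then some (pvVal days k lo) else none))
      ?_ ?_]
    · rw [pvCand, pvMin2_assoc]
    · intro x hx
      cases o with
      | none =>
        simp only [pvMin2] at hx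
        by_cases hok : pvOk days k lo = true
        · rw [if_pos hok] at hx
          have := hv lo (le_refl lo) (by push_cast; omega)
          simp at hx
          omega
        · rw [if_neg hok] at hx
          simp at hx
      | some a =>
        have ha : 0 ≤ a := ho a rfl
        by_cases hok : pvOk days k lo = true
        · rw [if_pos hok] at hx
          simp only [pvMin2] at hx
          have := hv lo (le_refl lo) (by push_cast; omega)
          have hxa : x = min a (pvVal days k lo) := by simpa using hx.symm
          rw [hxa]
          omega
        · rw [if_neg hok] at hx
          simp only [pvMin2] at hx
          have : x = a := by simpa using hx.symm
          omega
    · intro l h1 h2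
      exact hv l (by omega) (by push_cast; omega)
-- ===== VERDICT (by name: the statement is the Claim_ definition above) =====
theorem pulled_implementation_spec : Claim_equal_pulled_implementation := by
  intro flowers k _ hpre
  unfold Spec_pulled_implementation
  obtain ⟨_, hk⟩ := hpre
  rcases hk with hk | ⟨hfe, hke⟩
  · have hA : pulled_implementation flowers k
        = pvEnc (pvCand (pvBuildDays flowers) k 0
            ((((pvBuildDays flowers).length : Int) - (k + 1) - 0).toNat)) := by
      unfold pulled_implementation
      have h := pvALoop_eq (pvBuildDays flowers) k hk
        ((pvBuildDays flowers).length + 1) 0 none (le_refl 0) (by omega)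
      rw [show (0 : Int) + k + 1 = k + 1 by ring] at h
      rw [h]
      cases pvCand (pvBuildDays flowers) k 0
        ((((pvBuildDays flowers).length : Int) - (k + 1) - 0).toNat) <;> rfl
    have hB : pulled_implementation_alt flowers k
        = pvEnc (pvCand (pvBuildDays flowers) k 0
            ((((pvBuildDays flowers).length : Int) - (k + 1) - 0).toNat)) := by
      unfold pulled_implementation_alt
      rw [pvRange_norm 0 (((pvBuildDays flowers).length : Int) - (k + 1))]
      have h := pvFoldB (pvBuildDays flowers) k
        ((((pvBuildDays flowers).length : Int) - (k + 1)).toNat) 0 none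
        (by intro x hx; simp at hx)
        (by
          intro l _ _
          rw [pvVal]
          exact le_trans (pvDays_nonneg flowers l) (le_max_left _ _))
      rw [show ((((pvBuildDays flowers).length : Int) - (k + 1)).toNat)
          = ((((pvBuildDays flowers).length : Int) - (k + 1) - 0).toNat) by omega] at h
      simp only [pvMin2] at h
      exact h
    rw [hA, hB]
  · subst hfe; subst hke; decide
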